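-- pv_equiv track=rewrite | github.com/Yebin46/Algorithm-python3 | Programmers/완전탐색/level1_모의고사.py | solution
-- ===== SOURCE A (Python) =====
-- def solution(answers):
--     answer = []
--
--     # p1은 1,2,3,4,5 반복
--     # p2는 2,1,2,3,2,4,2,5 반복
--     # p3은 3,3,1,1,2,2,4,4,5,5 반복
--     p1 = [1,2,3,4,5]
--     p2 = [2,1,2,3,2,4,2,5]
--     p3 = [3,3,1,1,2,2,4,4,5,5]
--
--     s1=0
--     s2=0
--     s3=0
--
--     for ind, ans in enumerate(answers):
--         if ans == p1[ind%5]: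
--             s1 += 1
--         if ans == p2[ind%8]:
--             s2 += 1
--         if ans == p3[ind%10]:
--             s3 += 1
--
--     temp_list = [s1, s2, s3]
--     answer = list(filter(lambda x: temp_list[x] == max(temp_list), range(3)))
--
--     for i in range(len(answer)):
--         answer[i] += 1
--
--     return answer
-- ===== SOURCE B (Python) =====
-- def solution(answers):
--     def score(p, xs):
--         L = len(p)
--         s = 0
--         start = 0
--         while start < len(xs):
--             s += sum(a == b for a, b in zip(xs[start:start + L], p))
--             start += L
--         return s
--
--     patterns = [[1, 2, 3, 4, 5], [2, 1, 2, 3, 2, 4, 2, 5], [3, 3, 1, 1, 2, 2, 4, 4, 5, 5]]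
--     scores = [score(p, answers) for p in patterns]
--     best = max(scores)
--     return [i + 1 for i, s in enumerate(scores) if s == best]
-- ===== Notes on version B (the rewrite author's own statement) =====
-- stated objective: alternative
-- what changed: A makes one indexed pass carrying three counters, matching each answer via i % pattern-length table lookups, then filters range(3) and increments indices; B has no modulo arithmetic and no combined counter loop: it scores each pattern independently by zipping pattern-length blocks of answers against the pattern (advancing a block start), then selects the top 1-based indices in one enumerate comprehension.
import Mathlib
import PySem

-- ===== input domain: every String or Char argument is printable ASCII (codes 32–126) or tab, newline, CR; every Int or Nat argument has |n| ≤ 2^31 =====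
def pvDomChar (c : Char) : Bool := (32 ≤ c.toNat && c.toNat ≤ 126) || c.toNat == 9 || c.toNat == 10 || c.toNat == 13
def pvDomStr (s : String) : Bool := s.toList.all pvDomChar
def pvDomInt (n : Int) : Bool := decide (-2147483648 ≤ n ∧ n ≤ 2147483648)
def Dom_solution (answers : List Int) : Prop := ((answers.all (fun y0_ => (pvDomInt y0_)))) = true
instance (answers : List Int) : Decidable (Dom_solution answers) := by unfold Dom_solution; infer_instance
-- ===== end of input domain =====

-- B scores each pattern by zipping pattern-sized blocks of answers against the pattern (no modulo table lookups, no combined counter loop), then selects top indices in one comprehension; alternative decomposition, same cost.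


-- ===== PORT A =====
def pA1 : List Int := [1,2,3,4,5]
def pA2 : List Int := [2,1,2,3,2,4,2,5]
def pA3 : List Int := [3,3,1,1,2,2,4,4,5,5]

-- the 'for ind, ans in enumerate(answers)' loop with its three counters
def solLoopA (l : List Int) (ind : Nat) (s1 s2 s3 : Int) : Int × Int × Int :=
  match l with
  | [] => (s1, s2, s3)
  | a :: rest =>
      solLoopA rest (ind + 1)
        (if a == pA1.getD (ind % 5) 0 then s1 + 1 else s1)
        (if a == pA2.getD (ind % 8) 0 then s2 + 1 else s2)
        (if a == pA3.getD (ind % 10) 0 then s3 + 1 else s3)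

def solution (answers : List Int) : List Int :=
  let st := solLoopA answers 0 0 0 0
  let tempList : List Int := [st.1, st.2.1, st.2.2]
  let m : Int := (PySem.List.max? tempList (fun x => x)).getD 0   -- temp_list has 3 elements, never none
  let answer : List Nat := (List.range 3).filter (fun x => tempList.getD x 0 == m)
  answer.map (fun i => (i : Int) + 1)   -- the final 'answer[i] += 1' pass

-- ===== PORT B =====
-- sum(a == b for a, b in zip(xs, p)) : structural recursion over the zipped pairs
def countMatchB : List Int → List Int → Int
  | a :: l, b :: p => (if a == b then 1 else 0) + countMatchB l p
  | _, _ => 0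

-- the 'while start < len(xs): s += ...; start += L' loop; the pattern is passed head/tail
-- (the patterns are the nonempty literals below), L = (b :: p').length
def scoreChunkB (b : Int) (p' : List Int) (l : List Int) (start : Nat) : Int :=
  if start < l.length then
    countMatchB (PySem.List.slice l (some (start : Int)) (some ((start : Int) + ((b :: p').length : Int)))) (b :: p')
      + scoreChunkB b p' l (start + (b :: p').length)
  else 0
termination_by l.length - start
decreasing_by simp only [List.length_cons]; omega

def solution_alt (answers : List Int) : List Int :=
  let scores : List Int :=
    [scoreChunkB 1 [2,3,4,5] answers 0,
     scoreChunkB 2 [1,2,3,2,4,2,5] answers 0,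
     scoreChunkB 3 [3,1,1,2,2,4,4,5,5] answers 0]
  let best : Int := (PySem.List.max? scores (fun x => x)).getD 0   -- scores has 3 elements, never none
  (PySem.List.enumerate scores).filterMap (fun is => if is.2 == best then some (is.1 + 1) else none)

-- ===== PRECONDITION & SPEC =====
def Spec_solution (answers : List Int) (out : List Int) : Prop := out = solution_alt answers
instance (answers : List Int) (out : List Int) : Decidable (Spec_solution answers out) := by unfold Spec_solution; infer_instance

-- ===== CLAIM (what is proved, stated in full; the proofs are below) =====
def Claim_equal_solution : Prop := ∀ (answers : List Int), Dom_solution answers → Spec_solution answers (solution answers)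

-- ===== LEMMAS AND PROOFS =====

-- proof-only helper: A's per-pattern indexed score
def scoreIdx (p : List Int) (ind : Nat) (l : List Int) : Int :=
  match l with
  | [] => 0
  | a :: rest => (if a == p.getD (ind % p.length) 0 then 1 else 0) + scoreIdx p (ind + 1) rest

-- A's combined loop computes, in each counter, exactly the per-pattern indexed score plus the accumulator.
theorem solLoopA_eq_scores (l : List Int) (ind : Nat) (s1 s2 s3 : Int) :
    solLoopA l ind s1 s2 s3 =
      (s1 + scoreIdx [1,2,3,4,5] ind l,
       s2 + scoreIdx [2,1,2,3,2,4,2,5] ind l,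
       s3 + scoreIdx [3,3,1,1,2,2,4,4,5,5] ind l) := by
  induction l generalizing ind s1 s2 s3 with
  | nil => simp [solLoopA, scoreIdx]
  | cons a rest ih =>
      simp only [solLoopA, scoreIdx, ih, List.length_cons]
      refine Prod.ext ?_ (Prod.ext ?_ ?_) <;> simp [pA1, pA2, pA3] <;> split <;> ring

-- scoreIdx only depends on the start index through its residue mod the pattern length
theorem scoreIdx_congr (P : List Int) (l : List Int) :
    ∀ ind ind', ind % P.length = ind' % P.length → scoreIdx P ind l = scoreIdx P ind' l := by
  induction l with
  | nil => intro _ _ _; rfl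
  | cons a rest ih =>
      intro ind ind' h
      simp only [scoreIdx, h]
      congr 1
      exact ih (ind + 1) (ind' + 1) (by rw [Nat.add_mod ind 1, Nat.add_mod ind' 1, h])

-- one block: within a period, the indexed score is the zip-count of the pattern suffix plus a restart
theorem scoreIdx_block (P : List Int) (l : List Int) :
    ∀ ind, ind < P.length →
      scoreIdx P ind l = countMatchB l (P.drop ind) + scoreIdx P 0 (l.drop (P.length - ind)) := by
  induction l with
  | nil => intro ind h; simp [scoreIdx, countMatchB]
  | cons a rest ih =>
      intro ind h
      have hd : P.drop ind = P[ind] :: P.drop (ind + 1) := (List.getElem_cons_drop h).symm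
      have hget : P.getD (ind % P.length) 0 = P[ind] := by
        rw [Nat.mod_eq_of_lt h]; exact List.getD_eq_getElem P 0 h
      have hdropc : (a :: rest).drop (P.length - ind) = rest.drop (P.length - ind - 1) := by
        have : P.length - ind = (P.length - ind - 1) + 1 := by omega
        rw [this]; rfl
      rcases Nat.lt_or_ge (ind + 1) P.length with h1 | h1
      · simp only [scoreIdx, hget, hd, countMatchB, ih (ind + 1) h1, hdropc]
        have : P.length - (ind + 1) = P.length - ind - 1 := by omega
        rw [this]; ring
      · have hL : ind + 1 = P.length := by omega
        have hrestart : scoreIdx P (ind + 1) rest = scoreIdx P 0 rest :=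
          scoreIdx_congr P rest (ind + 1) 0 (by rw [hL]; simp)
        have hdropP : P.drop (ind + 1) = [] := List.drop_eq_nil_of_le (by omega)
        simp only [scoreIdx, hget, hd, countMatchB, hrestart, hdropc, hdropP]
        have h0 : P.length - ind - 1 = 0 := by omega
        rw [h0, List.drop_zero]
        ring

-- zip truncates at the shorter list, so taking a pattern-length prefix does not change the count
theorem countMatchB_take (P : List Int) : ∀ m : List Int, countMatchB (m.take P.length) P = countMatchB m P := by
  induction P with
  | nil => intro m; cases m <;> rfl
  | cons b P' ih =>
      intro m
      cases m with
      | nil => rfl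
      | cons a rest => simp only [List.length_cons, List.take_succ_cons, countMatchB, ih rest]

-- B's block loop equals A's indexed score on the remaining suffix (induction on the remaining length)
theorem scoreChunkB_eq (b : Int) (p' : List Int) :
    ∀ k (l : List Int) (start : Nat), l.length - start ≤ k →
      scoreChunkB b p' l start = scoreIdx (b :: p') 0 (l.drop start) := by
  intro k
  induction k with
  | zero =>
      intro l start h
      rw [scoreChunkB.eq_def, if_neg (by omega), List.drop_eq_nil_of_le (by omega)]
      rfl
  | succ k ih =>
      intro l start h
      by_cases hlt : start < l.length
      · rw [scoreChunkB.eq_def, if_pos hlt, PySem.List.slice_natCast_add,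
            countMatchB_take (b :: p') (l.drop start),
            ih l (start + (b :: p').length) (by simp only [List.length_cons]; omega)]
        have hblk := scoreIdx_block (b :: p') (l.drop start) 0 (by simp)
        simp only [List.drop_zero, Nat.sub_zero, List.drop_drop] at hblk
        rw [hblk]
      · rw [scoreChunkB.eq_def, if_neg hlt, List.drop_eq_nil_of_le (by omega)]
        rfl

-- The two selection phases agree on any three scores.
theorem select_eq (a b c : Int) :
    ((List.range 3).filter
        (fun x => ([a,b,c] : List Int).getD x 0 == (PySem.List.max? [a,b,c] (fun x => x)).getD 0)).map
      (fun i => (i : Int) + 1) =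
    (PySem.List.enumerate ([a,b,c] : List Int)).filterMap
      (fun is => if is.2 == (PySem.List.max? [a,b,c] (fun x => x)).getD 0 then some (is.1 + 1) else none) := by
  generalize (PySem.List.max? [a,b,c] (fun x => x)).getD 0 = m
  simp only [show List.range 3 = [0,1,2] from rfl, PySem.List.enumerate_cons,
    PySem.List.enumerate_nil, List.filterMap, List.filter, List.getD,
    List.getElem?_cons_zero, List.getElem?_cons_succ, Option.getD_some]
  norm_num
  split <;> split <;> split <;> simp_all

-- ===== VERDICT (by name: the statement is the Claim_ definition above) =====
theorem solution_spec : Claim_equal_solution := by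
  intro answers _
  unfold Spec_solution solution solution_alt
  rw [scoreChunkB_eq 1 [2,3,4,5] answers.length answers 0 (by omega),
      scoreChunkB_eq 2 [1,2,3,2,4,2,5] answers.length answers 0 (by omega),
      scoreChunkB_eq 3 [3,1,1,2,2,4,4,5,5] answers.length answers 0 (by omega)]
  simp only [List.drop_zero]
  simp only [solLoopA_eq_scores, zero_add]
  exact select_eq _ _ _
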